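-- pv_equiv track=rewrite | github.com/tomwhite/vczstore-poc | vczstore/store_copy.py | split_metadata_and_data_keys
-- ===== SOURCE A (Python) =====
-- ZARR_METADATA_FILENAMES = frozenset(
--     ("zarr.json", ".zarray", ".zattrs", ".zgroup", ".zmetadata")
-- )
--
-- def is_metadata_key(key):
--     return key.rsplit("/", 1)[-1] in ZARR_METADATA_FILENAMES
--
-- def split_metadata_and_data_keys(keys):
--     ordered_keys = sorted(keys, reverse=True)
--     metadata_keys = []
--     data_keys = []
--     for key in ordered_keys:
--         if is_metadata_key(key):
--             metadata_keys.append(key)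
--         else:
--             data_keys.append(key)
--     return metadata_keys, data_keys
-- ===== SOURCE B (Python) =====
-- ZARR_METADATA_FILENAMES = frozenset(
--     ("zarr.json", ".zarray", ".zattrs", ".zgroup", ".zmetadata")
-- )
--
-- def is_metadata_key(key):
--     return key.rsplit("/", 1)[-1] in ZARR_METADATA_FILENAMES
--
-- def split_metadata_and_data_keys(keys):
--     metadata_keys = sorted((k for k in keys if is_metadata_key(k)), reverse=True)
--     data_keys = sorted((k for k in keys if not is_metadata_key(k)), reverse=True)
--     return metadata_keys, data_keys
-- ===== Notes on version B (the rewrite author's own statement) =====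
-- stated objective: alternative
-- what changed: B filters the unsorted input into the metadata and data groups first and reverse-sorts each group separately, instead of A's global reverse sort followed by a partitioning append loop; equivalence rests on the lemma that filtering commutes with sorting.
import Mathlib
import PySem

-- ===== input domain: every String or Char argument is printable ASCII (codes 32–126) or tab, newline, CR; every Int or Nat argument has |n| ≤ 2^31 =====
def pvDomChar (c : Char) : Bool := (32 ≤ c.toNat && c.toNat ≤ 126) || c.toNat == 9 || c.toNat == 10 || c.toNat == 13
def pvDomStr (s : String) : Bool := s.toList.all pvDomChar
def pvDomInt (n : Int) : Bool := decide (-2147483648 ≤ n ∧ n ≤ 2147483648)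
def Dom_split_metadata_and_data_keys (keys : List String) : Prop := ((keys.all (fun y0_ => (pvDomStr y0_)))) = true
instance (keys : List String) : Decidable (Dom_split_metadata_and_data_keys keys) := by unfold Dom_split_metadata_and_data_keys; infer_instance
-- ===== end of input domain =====

-- B partitions the unsorted keys with is_metadata_key first and reverse-sorts each group
-- separately, instead of A's global reverse sort followed by a partitioning append loop
-- (objective: alternative decomposition, same cost).

-- ===== PORT A =====
-- shared module helper; key.rsplit("/", 1)[-1] ported by hand as the suffix after the
-- last '/' (the whole string if '/' is absent) — exact for all strings
def ZARR_METADATA_FILENAMES : List String :=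
  ["zarr.json", ".zarray", ".zattrs", ".zgroup", ".zmetadata"]

def is_metadata_key (key : String) : Bool :=
  ZARR_METADATA_FILENAMES.contains
    (String.ofList ((key.toList.reverse.takeWhile (fun c => c ≠ '/')).reverse))

def split_metadata_and_data_keys (keys : List String) : List String × List String :=
  let ordered_keys := PySem.List.sorted keys (fun x => x) true
  ordered_keys.foldl
    (fun (acc : List String × List String) key =>
      if is_metadata_key key then (acc.1 ++ [key], acc.2) else (acc.1, acc.2 ++ [key]))
    ([], [])

-- ===== PORT B =====
def split_metadata_and_data_keys_alt (keys : List String) : List String × List String :=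
  (PySem.List.sorted (keys.filter (fun k => is_metadata_key k)) (fun x => x) true,
   PySem.List.sorted (keys.filter (fun k => !is_metadata_key k)) (fun x => x) true)

-- ===== PRECONDITION & SPEC =====
def Spec_split_metadata_and_data_keys (keys : List String) (out : List String × List String) : Prop := out = split_metadata_and_data_keys_alt keys
instance (keys : List String) (out : List String × List String) : Decidable (Spec_split_metadata_and_data_keys keys out) := by unfold Spec_split_metadata_and_data_keys; infer_instance

-- ===== CLAIM (what is proved, stated in full; the proofs are below) =====
def Claim_equal_split_metadata_and_data_keys : Prop := ∀ (keys : List String), Dom_split_metadata_and_data_keys keys → Spec_split_metadata_and_data_keys keys (split_metadata_and_data_keys keys)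

-- ===== LEMMAS AND PROOFS =====

-- A's partition loop produces the two filters of the traversed list.
theorem foldl_partition (p : String → Bool) (l : List String) (m d : List String) :
    l.foldl
      (fun (acc : List String × List String) key =>
        if p key then (acc.1 ++ [key], acc.2) else (acc.1, acc.2 ++ [key])) (m, d)
    = (m ++ l.filter p, d ++ l.filter (fun x => !p x)) := by
  induction l generalizing m d with
  | nil => simp
  | cons x xs ih =>
    by_cases h : p x = true <;> simp [List.foldl_cons, h, ih]

-- a list that is a permutation of xs and is already reverse-ordered IS sorted(xs, reverse=True)
theorem sorted_rev_unique (xs ys : List String) (hp : ys.Perm xs)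
    (hs : ys.Pairwise (fun a b => b ≤ a)) :
    PySem.List.sorted xs (fun x => x) true = ys := by
  have h1 : (PySem.List.sorted xs (fun x => x) true).Perm ys :=
    (PySem.List.sorted_perm xs (fun x => x) true).trans hp.symm
  have h2 : (PySem.List.sorted xs (fun x => x) true).Pairwise (fun a b => b ≤ a) :=
    PySem.List.sorted_pairwise_rev xs (fun x => x)
  exact h1.eq_of_pairwise (fun a b _ _ hab hba => le_antisymm hba hab) h2 hs

-- filtering commutes with reverse sorting
theorem filter_sorted_rev (p : String → Bool) (keys : List String) :
    (PySem.List.sorted keys (fun x => x) true).filter p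
    = PySem.List.sorted (keys.filter p) (fun x => x) true := by
  refine (sorted_rev_unique _ _ ?_ ?_).symm
  · exact (PySem.List.sorted_perm keys (fun x => x) true).filter p
  · exact (PySem.List.sorted_pairwise_rev keys (fun x => x)).filter _

-- ===== VERDICT (by name: the statement is the Claim_ definition above) =====
theorem split_metadata_and_data_keys_spec : Claim_equal_split_metadata_and_data_keys := by
  intro keys _
  unfold Spec_split_metadata_and_data_keys split_metadata_and_data_keys
    split_metadata_and_data_keys_alt
  simp only [foldl_partition, List.nil_append, filter_sorted_rev]
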